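-- pv_equiv track=rewrite | github.com/Danieldm16/Portafolio | Creacion de compiladores/ProyectoAnalisisSintactico-DanielSalazar-17289193/ProyectoSintactico.py | tokensqueseesperan
-- ===== SOURCE A (Python) =====
-- def simboloterminalequivalenteacolumna(numcolumna):
--
--     if numcolumna == 0:#:
--         return ":"
--     if numcolumna == 1:#@[
--         return "@["
--     if numcolumna == 2:#@]
--         return "@]"
--     if numcolumna == 3:#@(
--         return "@("
--     if numcolumna == 4:#@)
--         return "@)"
--     if numcolumna == 5:#.
--         return "."
--     if numcolumna == 6:#@{
--         return "@{"
--     if numcolumna == 7:#@}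
--         return "@}"
--     if numcolumna == 8:#;
--         return ";"
--     if numcolumna == 9:#<+
--         return "<+"
--     if numcolumna == 10:#<-
--         return "<-"
--     if numcolumna == 11:#$case
--         return "$case"
--     if numcolumna == 12:#!
--         return "!"
--     if numcolumna == 13:#%=%
--         return "%=%"
--     if numcolumna == 14:#@>
--         return "@>"
--     if numcolumna == 15:#@<
--         return "@<"
--     if numcolumna == 16:#@<=
--         return "@<="
--     if numcolumna == 17:#@>=
--         return "@>="
--     if numcolumna == 18:#@|
--         return "@|"
--     if numcolumna == 19:#@&
--         return "@&"
--     if numcolumna == 20:#+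
--         return "+"
--     if numcolumna == 21:#-
--         return "-"
--     if numcolumna == 22:#$*
--         return "$*"
--     if numcolumna == 23:#@/
--         return "@/"
--     if numcolumna == 24:#$suppose
--         return "$suppose"
--     if numcolumna == 25:#$while
--         return "$while"
--     if numcolumna == 26:#$Repeat
--         return "$Repeat"
--     if numcolumna == 27:#$for
--         return "$for"
--     if numcolumna == 28:#$enter
--         return "$enter"
--     if numcolumna == 29:#$Finishing
--         return "$Finishing"
--     if numcolumna == 30:#$Out
--         return "$Out"
--     if numcolumna == 31:#$Get
--         return "$Get"
--     if numcolumna == 32:#$main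
--         return "$main"
--     if numcolumna == 33:#$integer
--         return "$integer"
--     if numcolumna == 34:#$real
--         return "$real"
--     if numcolumna == 35:#$string
--         return "$string"
--     if numcolumna == 36:#cases
--         return "$cases"
--     if numcolumna == 37:#identificador
--         return "identificador/variable"
--     if numcolumna == 38:#numero
--         return "número"
--     if numcolumna == 39:# $ END OF FILE
--         return "EOF($)"
--
-- def tokensqueseesperan(fila, tablasintactica):
-- 	columnas = []
-- 	tokensesperados = []
-- 	contador = 0
--
-- 	for token in tablasintactica[fila]:
-- 		if token != 404:
-- 			columnas.append(contador)
-- 		contador+=1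
--
-- 	for col in columnas:
-- 		simboloterminal = simboloterminalequivalenteacolumna(col)
-- 		tokensesperados.append(simboloterminal)
--
-- 	return tokensesperados
-- ===== SOURCE B (Python) =====
-- SYMBOLS = [":", "@[", "@]", "@(", "@)", ".", "@{", "@}", ";", "<+",
--            "<-", "$case", "!", "%=%", "@>", "@<", "@<=", "@>=", "@|", "@&",
--            "+", "-", "$*", "@/", "$suppose", "$while", "$Repeat", "$for", "$enter", "$Finishing",
--            "$Out", "$Get", "$main", "$integer", "$real", "$string", "$cases",
--            "identificador/variable", "n\u00famero", "EOF($)"]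
--
--
-- def _esperados(tokens, simbolos):
--     # lockstep recursion on the row and the symbol list; no indices anywhere
--     if not tokens or not simbolos:
--         return []
--     resto = _esperados(tokens[1:], simbolos[1:])
--     if tokens[0] == 404:
--         return resto
--     return [simbolos[0]] + resto
--
--
-- def tokensqueseesperan(fila, tablasintactica):
--     return _esperados(tablasintactica[fila], SYMBOLS)
-- ===== Notes on version B (the rewrite author's own statement) =====
-- stated objective: simpler
-- what changed: B recurses on the row and the constant symbol list in lockstep (consuming both lists together), so A's index counter, its two staged passes and the 40-branch comparison cascade all disappear.
import Mathlib
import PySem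

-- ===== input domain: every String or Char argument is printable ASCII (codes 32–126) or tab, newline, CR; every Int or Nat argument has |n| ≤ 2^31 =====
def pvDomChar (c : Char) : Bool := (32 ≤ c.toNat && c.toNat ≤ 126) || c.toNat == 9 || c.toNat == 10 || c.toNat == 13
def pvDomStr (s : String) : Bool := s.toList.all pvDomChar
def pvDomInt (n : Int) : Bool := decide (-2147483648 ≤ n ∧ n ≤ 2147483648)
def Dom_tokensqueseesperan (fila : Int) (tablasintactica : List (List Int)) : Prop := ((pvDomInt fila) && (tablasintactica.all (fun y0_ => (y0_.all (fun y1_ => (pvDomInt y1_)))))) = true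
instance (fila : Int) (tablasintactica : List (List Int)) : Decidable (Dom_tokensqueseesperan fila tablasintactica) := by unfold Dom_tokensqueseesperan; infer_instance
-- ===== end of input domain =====

-- B replaces A's two staged passes (index collection, then a 40-branch comparison cascade)
-- by a lockstep recursion over the row and a constant symbol list: objective 'simpler'.

-- ===== PORT A =====
-- Python helper simboloterminalequivalenteacolumna: falls off the end (returns None) for
-- columns outside 0..39, hence Option String.
def pvSimbolo (numcolumna : Int) : Option String :=
  if numcolumna = 0 then some ":" else
  if numcolumna = 1 then some "@[" else
  if numcolumna = 2 then some "@]" else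
  if numcolumna = 3 then some "@(" else
  if numcolumna = 4 then some "@)" else
  if numcolumna = 5 then some "." else
  if numcolumna = 6 then some "@{" else
  if numcolumna = 7 then some "@}" else
  if numcolumna = 8 then some ";" else
  if numcolumna = 9 then some "<+" else
  if numcolumna = 10 then some "<-" else
  if numcolumna = 11 then some "$case" else
  if numcolumna = 12 then some "!" else
  if numcolumna = 13 then some "%=%" else
  if numcolumna = 14 then some "@>" else
  if numcolumna = 15 then some "@<" else
  if numcolumna = 16 then some "@<=" else
  if numcolumna = 17 then some "@>=" else
  if numcolumna = 18 then some "@|" else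
  if numcolumna = 19 then some "@&" else
  if numcolumna = 20 then some "+" else
  if numcolumna = 21 then some "-" else
  if numcolumna = 22 then some "$*" else
  if numcolumna = 23 then some "@/" else
  if numcolumna = 24 then some "$suppose" else
  if numcolumna = 25 then some "$while" else
  if numcolumna = 26 then some "$Repeat" else
  if numcolumna = 27 then some "$for" else
  if numcolumna = 28 then some "$enter" else
  if numcolumna = 29 then some "$Finishing" else
  if numcolumna = 30 then some "$Out" else
  if numcolumna = 31 then some "$Get" else
  if numcolumna = 32 then some "$main" else
  if numcolumna = 33 then some "$integer" else
  if numcolumna = 34 then some "$real" else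
  if numcolumna = 35 then some "$string" else
  if numcolumna = 36 then some "$cases" else
  if numcolumna = 37 then some "identificador/variable" else
  if numcolumna = 38 then some "número" else
  if numcolumna = 39 then some "EOF($)" else
  none

-- tablasintactica[fila] raising (none) and the helper returning None (a non-String) are
-- both excluded by Pre_ below; there the port skips, claiming nothing.
def tokensqueseesperan (fila : Int) (tablasintactica : List (List Int)) : List String :=
  match PySem.List.pyGet? tablasintactica fila with
  | none => []
  | some row =>
    let p := row.foldl
      (fun (st : List Int × Int) token =>
        if token ≠ 404 then (st.1 ++ [st.2], st.2 + 1) else (st.1, st.2 + 1))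
      ([], 0)
    p.1.foldl
      (fun acc col =>
        match pvSimbolo col with
        | some s => acc ++ [s]
        | none => acc)
      []

-- ===== PORT B =====
def pvSYMBOLS : List String :=
  [":", "@[", "@]", "@(", "@)", ".", "@{", "@}", ";", "<+",
   "<-", "$case", "!", "%=%", "@>", "@<", "@<=", "@>=", "@|", "@&",
   "+", "-", "$*", "@/", "$suppose", "$while", "$Repeat", "$for", "$enter", "$Finishing",
   "$Out", "$Get", "$main", "$integer", "$real", "$string", "$cases",
   "identificador/variable", "número", "EOF($)"]

-- lockstep recursion on the row and the symbol list (Source B's _esperados)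
def pvEsperados : List Int → List String → List String
  | [], _ => []
  | _ :: _, [] => []
  | t :: ts, s :: ss =>
    let resto := pvEsperados ts ss
    if t = 404 then resto else s :: resto

def tokensqueseesperan_alt (fila : Int) (tablasintactica : List (List Int)) : List String :=
  match PySem.List.pyGet? tablasintactica fila with
  | none => []
  | some row => pvEsperados row pvSYMBOLS

-- ===== PRECONDITION & SPEC =====
-- Pre_ excludes (a) fila out of range, where Python A raises IndexError, and (b) rows with a
-- token ≠ 404 at a column ≥ 40, where A's helper returns None — a non-String in A's result.
def Pre_tokensqueseesperan (fila : Int) (tablasintactica : List (List Int)) : Prop :=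
  PySem.Raise.InRange tablasintactica.length fila ∧
  ((((PySem.List.pyGet? tablasintactica fila).getD []).drop 40).all (fun t => t == 404)) = true

instance (fila : Int) (tablasintactica : List (List Int)) : Decidable (Pre_tokensqueseesperan fila tablasintactica) := by unfold Pre_tokensqueseesperan; infer_instance

def pvWitness_tokensqueseesperan : Int × List (List Int) := (0, [[404, 7, 404]])

def Spec_tokensqueseesperan (fila : Int) (tablasintactica : List (List Int)) (out : List String) : Prop := out = tokensqueseesperan_alt fila tablasintactica
instance (fila : Int) (tablasintactica : List (List Int)) (out : List String) : Decidable (Spec_tokensqueseesperan fila tablasintactica out) := by unfold Spec_tokensqueseesperan; infer_instance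

-- ===== CLAIM =====
def Claim_equal_tokensqueseesperan : Prop := ∀ (fila : Int) (tablasintactica : List (List Int)), Dom_tokensqueseesperan fila tablasintactica → Pre_tokensqueseesperan fila tablasintactica → Spec_tokensqueseesperan fila tablasintactica (tokensqueseesperan fila tablasintactica)

-- ===== LEMMAS AND PROOFS =====

-- A's first loop collects exactly the indices (from start k) of the non-404 tokens.
theorem pvFoldl_columns (row : List Int) (acc : List Int) (k : Int) :
    row.foldl
      (fun (st : List Int × Int) token =>
        if token ≠ 404 then (st.1 ++ [st.2], st.2 + 1) else (st.1, st.2 + 1))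
      (acc, k)
    = (acc ++ (PySem.List.enumerate row k).filterMap
          (fun p => if p.2 ≠ 404 then some p.1 else none),
       k + row.length) := by
  induction row generalizing acc k with
  | nil => simp [PySem.List.enumerate_nil]
  | cons t ts ih =>
    rw [List.foldl_cons, PySem.List.enumerate_cons, List.filterMap_cons]
    by_cases h : t = 404
    · rw [if_neg (by simp [h]), ih]
      simp [h, Prod.ext_iff]
      omega
    · rw [if_pos (by simp [h]), ih]
      simp [h, Prod.ext_iff]
      omega

-- A's second loop is a filterMap through the helper.
theorem pvFoldl_filterMap (l : List Int) (acc : List String) :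
    l.foldl
      (fun acc col =>
        match pvSimbolo col with
        | some s => acc ++ [s]
        | none => acc)
      acc
    = acc ++ l.filterMap pvSimbolo := by
  induction l generalizing acc with
  | nil => simp
  | cons c cs ih =>
    cases h : pvSimbolo c <;> simp [h, ih]

-- The cascade agrees with the head of the dropped symbol table, for every column ≥ 0.
theorem pvSimbolo_head_drop : ∀ k : Nat, k < 41 →
    pvSimbolo ((k : Int)) = (pvSYMBOLS.drop k).head? := by
  decide

theorem pvSimbolo_head (k : Nat) :
    pvSimbolo ((k : Int)) = (pvSYMBOLS.drop k).head? := by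
  by_cases hk : k < 41
  · exact pvSimbolo_head_drop k hk
  · have h1 : (pvSYMBOLS.drop k).head? = none := by
      have : pvSYMBOLS.drop k = [] := List.drop_eq_nil_of_le (by have h40 : pvSYMBOLS.length = 40 := rfl; omega)
      simp [this]
    rw [h1]
    have hk41 : (41 : Int) ≤ (k : Int) := by omega
    unfold pvSimbolo
    repeat rw [if_neg (by omega)]

-- B's lockstep recursion equals A's index-then-cascade composition, for any start offset.
theorem pvEsperados_enumerate (row : List Int) (k : Nat) :
    pvEsperados row (pvSYMBOLS.drop k)
      = (PySem.List.enumerate row ((k : Int))).filterMap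
          (fun p => if p.2 ≠ 404 then pvSimbolo p.1 else none) := by
  induction row generalizing k with
  | nil => simp [pvEsperados, PySem.List.enumerate_nil]
  | cons t ts ih =>
    rw [PySem.List.enumerate_cons, List.filterMap_cons]
    have hk1 : ((k : Int)) + 1 = ((k + 1 : Nat) : Int) := by push_cast; ring
    have htail : (PySem.List.enumerate ts ((k : Int) + 1)).filterMap
          (fun p => if p.2 ≠ 404 then pvSimbolo p.1 else none)
        = pvEsperados ts (pvSYMBOLS.drop (k + 1)) := by
      rw [hk1, ← ih]
    cases hd : pvSYMBOLS.drop k with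
    | nil =>
      have hd1 : pvSYMBOLS.drop (k + 1) = [] := by
        rw [← List.tail_drop, hd]; rfl
      have hnone : pvSimbolo ((k : Int)) = none := by
        rw [pvSimbolo_head, hd]; rfl
      have hts : pvEsperados ts ([] : List String) = [] := by
        cases ts <;> rfl
      rw [hd1, hts] at htail
      simp only [pvEsperados, htail, hnone]
      split_ifs <;> rfl
    | cons s ss =>
      have hs : pvSimbolo ((k : Int)) = some s := by
        rw [pvSimbolo_head, hd]; rfl
      have hd1 : pvSYMBOLS.drop (k + 1) = ss := by
        rw [← List.tail_drop, hd]; rfl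
      rw [hd1] at htail
      simp only [pvEsperados, htail, hs]
      by_cases h : t = 404 <;> simp [h]

-- ===== VERDICT =====
theorem tokensqueseesperan_spec : Claim_equal_tokensqueseesperan := by
  intro fila tab _hdom _hpre
  unfold Spec_tokensqueseesperan tokensqueseesperan tokensqueseesperan_alt
  cases hget : PySem.List.pyGet? tab fila with
  | none => rfl
  | some row =>
    simp only [pvFoldl_columns, List.nil_append, pvFoldl_filterMap, List.filterMap_filterMap]
    have h0 : pvSYMBOLS.drop 0 = pvSYMBOLS := List.drop_zero
    rw [← h0, pvEsperados_enumerate row 0]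
    apply List.filterMap_congr
    intro p _
    by_cases h : p.2 = 404 <;> simp [h, Option.bind]
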